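-- pv_equiv track=rewrite | github.com/aaghamohammadi/python-tutor | HW1-14002/4/4.py | total_duplicate_adjunct_ch
-- ===== SOURCE A (Python) =====
-- def total_duplicate_adjunct_ch(sentences):
--     count = 0
--     for sentence in sentences:
--         sentence_words = sentence.split()
--         for word in sentence_words:
--             if has_adjunct_ch(word):
--                 count += 1
--     return count
--
-- def has_adjunct_ch(word):
--     for i in range(len(word) - 1):
--         if word[i] == word[i + 1]:
--             return True
--     return False
-- ===== SOURCE B (Python) =====
-- def squeeze(word):
--     """Compress runs of equal adjacent characters down to a single character."""
--     out = []
--     for ch in word: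
--         if not out or out[-1] != ch:
--             out.append(ch)
--     return out
--
--
-- def total_duplicate_adjunct_ch(sentences):
--     words = [w for s in sentences for w in s.split()]
--     return sum(1 for w in words if len(squeeze(w)) < len(w))
-- ===== Notes on version B (the rewrite author's own statement) =====
-- stated objective: alternative
-- what changed: Instead of scanning index pairs for an adjacent match, B run-length-compresses each word (dropping characters equal to their predecessor) and counts the word iff the compressed form is shorter; the word list is built in one staged flattening pass and counted with sum.
import Mathlib
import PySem

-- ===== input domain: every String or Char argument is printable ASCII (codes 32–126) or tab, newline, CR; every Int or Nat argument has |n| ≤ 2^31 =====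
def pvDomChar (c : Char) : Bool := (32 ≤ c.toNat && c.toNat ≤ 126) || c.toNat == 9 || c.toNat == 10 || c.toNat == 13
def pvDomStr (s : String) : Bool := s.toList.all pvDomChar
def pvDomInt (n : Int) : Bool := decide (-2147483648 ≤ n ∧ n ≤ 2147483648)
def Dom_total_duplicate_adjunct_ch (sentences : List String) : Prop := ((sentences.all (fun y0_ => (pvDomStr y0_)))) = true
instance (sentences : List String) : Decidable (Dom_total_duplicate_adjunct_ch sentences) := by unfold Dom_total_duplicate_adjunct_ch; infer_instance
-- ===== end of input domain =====

-- B counts a word by run-length-compressing it (drop chars equal to their predecessor) and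
-- comparing lengths, instead of A's index-pair scan (objective: alternative).

-- ===== PORT A =====
-- port of has_adjunct_ch: 'for i in range(len(word)-1): if word[i] == word[i+1]: return True'
-- (early return from the for-loop is List.any over the range)
def hasAdjunctCh (word : String) : Bool :=
  (PySem.List.pyRange 0 (PySem.Str.len word - 1) 1).any fun i =>
    PySem.Str.pyGet? word i == PySem.Str.pyGet? word (i + 1)

def total_duplicate_adjunct_ch (sentences : List String) : Int :=
  sentences.foldl (fun count sentence =>
    (PySem.Str.split₀ sentence).foldl (fun count word =>
      if hasAdjunctCh word then count + 1 else count) count) 0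

-- ===== PORT B =====
-- squeeze: 'out = []; for ch in word: if not out or out[-1] != ch: out.append(ch)'
def squeeze (word : String) : List Char :=
  word.toList.foldl
    (fun out ch => if out.isEmpty || out.getLast? != some ch then out ++ [ch] else out) []

-- words = [w for s in sentences for w in s.split()]; sum(1 for w in words if len(squeeze(w)) < len(w))
def total_duplicate_adjunct_ch_alt (sentences : List String) : Int :=
  let words := sentences.flatMap (fun s => PySem.Str.split₀ s)
  ((words.countP fun w => decide (((squeeze w).length : Int) < PySem.Str.len w)) : Nat)

-- ===== PRECONDITION & SPEC =====
def Spec_total_duplicate_adjunct_ch (sentences : List String) (out : Int) : Prop := out = total_duplicate_adjunct_ch_alt sentences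
instance (sentences : List String) (out : Int) : Decidable (Spec_total_duplicate_adjunct_ch sentences out) := by unfold Spec_total_duplicate_adjunct_ch; infer_instance

-- ===== CLAIM (what is proved, stated in full; the proofs are below) =====
def Claim_equal_total_duplicate_adjunct_ch : Prop := ∀ (sentences : List String), Dom_total_duplicate_adjunct_ch sentences → Spec_total_duplicate_adjunct_ch sentences (total_duplicate_adjunct_ch sentences)

-- ===== LEMMAS AND PROOFS =====

-- proof-side: zip-of-consecutive-pairs adjacency predicate (bridge between the two ports)
def hasAdjPair (l : List Char) : Bool :=
  (l.zip l.tail).any fun p => p.1 == p.2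

-- proof-side: tail-recursive characterisation of squeeze given the last kept character p
def destT (p : Char) : List Char → List Char
  | [] => []
  | c :: t => if c = p then destT p t else c :: destT c t

theorem squeeze_foldl (l : List Char) (out : List Char) (p : Char)
    (hne : out ≠ []) (hl : out.getLast? = some p) :
    l.foldl (fun out ch => if out.isEmpty || out.getLast? != some ch then out ++ [ch] else out) out
      = out ++ destT p l := by
  induction l generalizing out p with
  | nil => simp [destT]
  | cons c t ih =>
    simp only [List.foldl_cons, destT]
    by_cases hcp : c = p
    · subst hcp
      have : (out.isEmpty || out.getLast? != some c) = false := by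
        simp [hne, hl]
      rw [this]
      simp only [Bool.false_eq_true, if_false]
      exact ih out c hne hl
    · have : (out.isEmpty || out.getLast? != some c) = true := by
        simp [hl, bne_iff_ne]
        exact Or.inr (Ne.symm hcp)
      rw [this]
      simp only [if_true, if_neg hcp]
      rw [ih (out ++ [c]) c (by simp) (by simp)]
      simp

theorem squeeze_cons (c : Char) (t : List Char) (w : String) (hw : w.toList = c :: t) :
    squeeze w = c :: destT c t := by
  unfold squeeze
  rw [hw]
  simp only [List.foldl_cons, List.isEmpty_nil, Bool.true_or, if_true, List.nil_append]
  exact squeeze_foldl t [c] c (by simp) (by simp)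

theorem destT_length_le (l : List Char) (p : Char) : (destT p l).length ≤ l.length := by
  induction l generalizing p with
  | nil => simp [destT]
  | cons c t ih =>
    simp only [destT]
    by_cases h : c = p
    · simp only [if_pos h]
      exact le_trans (ih p) (by simp)
    · simp only [if_neg h, List.length_cons]
      exact Nat.succ_le_succ (ih c)

-- B's length test equals the zip adjacency test on p :: t
theorem destT_lt_iff_adj (t : List Char) (p : Char) :
    decide ((destT p t).length < t.length) = hasAdjPair (p :: t) := by
  induction t generalizing p with
  | nil => simp [destT, hasAdjPair]
  | cons b t' ih =>
    simp only [destT, hasAdjPair, List.tail_cons, List.zip_cons_cons, List.any_cons]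
    by_cases hbp : b = p
    · subst hbp
      have hle := destT_length_le t' b
      have hlt : (destT b t').length < t'.length + 1 := by omega
      simp [hlt]
    · have hb : (p == b) = false := by
        simp; exact Ne.symm hbp
      simp only [if_neg hbp, List.length_cons, hb, Bool.false_or]
      have h2 : decide ((destT b t').length + 1 < t'.length + 1)
           = decide ((destT b t').length < t'.length) := by
        simp
      rw [h2, ih b]
      simp [hasAdjPair]

-- The index-based adjacency test over List.range equals the zip-of-pairs test.
theorem range_adj_eq_zip (l : List Char) :
    (List.range (l.length - 1)).any (fun i => l[i]? == l[i + 1]?)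
      = (l.zip l.tail).any (fun p => p.1 == p.2) := by
  induction l with
  | nil => rfl
  | cons a t ih =>
    cases t with
    | nil => rfl
    | cons b t' =>
      simp only [List.length_cons, Nat.add_sub_cancel] at *
      rw [List.range_succ_eq_map]
      simp only [List.any_cons, List.any_map, Function.comp_def]
      simp only [List.getElem?_cons_succ, List.getElem?_cons_zero]
      simp only [List.getElem?_cons_succ] at ih
      rw [ih]
      simp [List.zip]

-- A's index-scan predicate equals the zip test.
theorem hasAdjunctCh_eq_zip (w : String) : hasAdjunctCh w = hasAdjPair w.toList := by
  unfold hasAdjunctCh hasAdjPair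
  rw [PySem.Str.len_eq]
  rcases Nat.eq_zero_or_pos w.toList.length with h0 | hpos
  · simp [List.length_eq_zero_iff.mp h0, PySem.List.pyRange_one_eq_nil]
  · have hb : (w.toList.length : Int) - 1 = ((w.toList.length - 1 : Nat) : Int) := by omega
    rw [hb, PySem.List.pyRange_zero_nat]
    simp only [List.any_map, Function.comp_def]
    rw [← range_adj_eq_zip]
    congr 1
    funext i
    have h1 : ((i : Int) + 1) = ((i + 1 : Nat) : Int) := by push_cast; ring
    simp only [PySem.Str.pyGet?, PySem.Chars.pyGet?_eq_listPyGet?, h1,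
      PySem.List.pyGet?_natCast]

-- A's predicate equals B's compressed-length predicate on every word.
theorem hasAdjunctCh_eq_squeeze (w : String) :
    hasAdjunctCh w = decide (((squeeze w).length : Int) < PySem.Str.len w) := by
  rw [hasAdjunctCh_eq_zip, PySem.Str.len_eq]
  cases hw : w.toList with
  | nil =>
    simp [hasAdjPair, squeeze, hw]
  | cons c t =>
    rw [squeeze_cons c t w hw, ← destT_lt_iff_adj t c]
    simp only [List.length_cons]
    congr 1
    have h1 : (destT c t).length < t.length ↔
        (((c :: destT c t).length : Int) < ((c :: t).length : Nat)) := by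
      simp only [List.length_cons]; push_cast; omega
    simp only [List.length_cons] at h1 ⊢
    exact propext h1

-- The nested counting loops compute countP of the flattened word list.
theorem foldl_eq_countP (sentences : List String) (c : Int) :
    sentences.foldl (fun count sentence =>
        (PySem.Str.split₀ sentence).foldl (fun count word =>
          if hasAdjunctCh word then count + 1 else count) count) c
      = c + ((sentences.flatMap (fun s => PySem.Str.split₀ s)).countP
              (fun w => decide (((squeeze w).length : Int) < PySem.Str.len w)) : Nat) := by
  induction sentences generalizing c with
  | nil => simp
  | cons s rest ih =>
    simp only [List.foldl_cons, List.flatMap_cons, List.countP_append]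
    rw [ih, PySem.List.foldl_count_if]
    have : List.countP hasAdjunctCh (PySem.Str.split₀ s)
         = List.countP (fun w => decide (((squeeze w).length : Int) < PySem.Str.len w))
             (PySem.Str.split₀ s) := by
      apply List.countP_congr; intro w _; rw [hasAdjunctCh_eq_squeeze]
    rw [this]; push_cast; ring

-- ===== VERDICT (by name: the statement is the Claim_ definition above) =====
theorem total_duplicate_adjunct_ch_spec : Claim_equal_total_duplicate_adjunct_ch := by
  intro sentences _
  unfold Spec_total_duplicate_adjunct_ch total_duplicate_adjunct_ch total_duplicate_adjunct_ch_alt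
  rw [foldl_eq_countP]
  simp
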